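-- pv_equiv track=rewrite | github.com/ngnambka00-github/CBR-SUBG-KBQA | src/infer.py | get_triples_from_path
-- ===== SOURCE A (Python) =====
-- from typing import Text, List
--
-- def get_triples_from_path(path: List[str]):
--     prev_ent = None
--     prev_rel = None
--     triples = set()
--     for ctr, e_or_r in enumerate(path):
--         if ctr % 2 == 0:  # entiy
--             if prev_ent is not None and prev_rel is not None:
--                 triples.add((prev_ent, prev_rel, e_or_r))
--             prev_ent = e_or_r
--         else:
--             prev_rel = e_or_r
--     return triples
-- ===== SOURCE B (Python) =====
-- def get_triples_from_path(path):
--     triples = []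
--     i = 0
--     while i + 2 < len(path):
--         triples.append((path[i], path[i + 1], path[i + 2]))
--         i += 2
--     return set(triples)
-- ===== Notes on version B (the rewrite author's own statement) =====
-- stated objective: alternative
-- what changed: Replaces the prev_ent/prev_rel/ctr%2 state machine over enumerate(path) with a direct strided index walk that emits (path[i], path[i+1], path[i+2]) for i = 0, 2, 4, ... and wraps the triple list in a set.
import Mathlib
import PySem

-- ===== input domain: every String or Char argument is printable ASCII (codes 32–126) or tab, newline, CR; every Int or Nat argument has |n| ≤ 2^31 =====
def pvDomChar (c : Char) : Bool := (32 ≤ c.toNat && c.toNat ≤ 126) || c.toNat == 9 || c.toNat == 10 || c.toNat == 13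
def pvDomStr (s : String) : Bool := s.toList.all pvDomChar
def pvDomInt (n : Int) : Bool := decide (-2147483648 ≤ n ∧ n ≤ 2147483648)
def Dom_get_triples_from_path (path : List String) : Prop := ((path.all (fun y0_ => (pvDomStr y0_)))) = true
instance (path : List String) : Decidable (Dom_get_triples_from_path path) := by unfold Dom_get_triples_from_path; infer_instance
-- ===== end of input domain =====

-- B replaces A's prev_ent/prev_rel parity state machine by a direct strided index walk
-- emitting (path[i], path[i+1], path[i+2]) for even i (alternative decomposition, same cost).


-- ===== PORT A =====
-- loop body of A: state (prev_ent, prev_rel, triples), one enumerate item (ctr, e_or_r)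
def pvStepA (st : Option String × Option String × PySem.Set (String × String × String))
    (p : Int × String) : Option String × Option String × PySem.Set (String × String × String) :=
  if PySem.Int.mod p.1 2 == 0 then
    match st.1, st.2.1 with
    | some a, some b => (some p.2, st.2.1, PySem.Set.add st.2.2 (a, b, p.2))
    | _, _ => (some p.2, st.2.1, st.2.2)
  else (st.1, some p.2, st.2.2)

def get_triples_from_path (path : List String) : List (String × String × String) :=
  (List.foldl pvStepA (none, none, PySem.Set.empty) (PySem.List.enumerate path 0)).2.2

-- ===== PORT B =====
-- while i + 2 < len(path): triples.append((path[i], path[i+1], path[i+2])); i += 2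
-- (i starts at 0 and only grows, so it is a Nat and the three indices are in range by the guard)
def pvLoopB (path : List String) (i : Nat) (triples : List (String × String × String)) :
    List (String × String × String) :=
  if h : i + 2 < path.length then
    pvLoopB path (i + 2)
      (triples ++ [(path[i], path[i + 1], path[i + 2])])
  else triples
termination_by path.length - i

def get_triples_from_path_alt (path : List String) : List (String × String × String) :=
  PySem.Set.ofList (pvLoopB path 0 [])

-- ===== PRECONDITION & SPEC =====
def Spec_get_triples_from_path (path : List String) (out : List (String × String × String)) : Prop := out = get_triples_from_path_alt path
instance (path : List String) (out : List (String × String × String)) : Decidable (Spec_get_triples_from_path path out) := by unfold Spec_get_triples_from_path; infer_instance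

-- ===== CLAIM (what is proved, stated in full; the proofs are below) =====
def Claim_equal_get_triples_from_path : Prop := ∀ (path : List String), Dom_get_triples_from_path path → Spec_get_triples_from_path path (get_triples_from_path path)

-- ===== LEMMAS AND PROOFS =====

-- proof-only middle form: the triple list, by structural recursion two positions at a time
def pvTriples : List String → List (String × String × String)
  | e :: r :: x :: t => (e, r, x) :: pvTriples (x :: t)
  | _ => []

theorem pvMod_two_even_succ {n : Int} (h : (2 : Int) ∣ n) : ¬ (2 : Int) ∣ (n + 1) := by
  omega

theorem pvMod_two_even_succ_succ {n : Int} (h : (2 : Int) ∣ n) : (2 : Int) ∣ (n + 1 + 1) := by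
  omega

-- A-side loop invariant: from an even counter with both prev's set, A's loop folds Set.add
-- over exactly the triples pvTriples (a :: b :: p)
theorem pvKey : ∀ (p : List String) (a b : String)
    (s : PySem.Set (String × String × String)) (n : Int),
    (2 : Int) ∣ n →
    (List.foldl pvStepA (some a, some b, s) (PySem.List.enumerate p n)).2.2 =
      (pvTriples (a :: b :: p)).foldl PySem.Set.add s
  | [], a, b, s, n, _ => by simp [PySem.List.enumerate_nil, pvTriples]
  | [x], a, b, s, n, h => by
    simp [PySem.List.enumerate_cons, PySem.List.enumerate_nil, pvTriples, pvStepA, h]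
  | x :: y :: t, a, b, s, n, h => by
    have h1 := pvMod_two_even_succ h
    have h2 := pvMod_two_even_succ_succ h
    simp only [PySem.List.enumerate_cons, List.foldl_cons]
    rw [show pvStepA (some a, some b, s) (n, x)
          = (some x, some b, PySem.Set.add s (a, b, x)) by simp [pvStepA, h]]
    rw [show pvStepA (some x, some b, PySem.Set.add s (a, b, x)) (n + 1, y)
          = (some x, some y, PySem.Set.add s (a, b, x)) by simp [pvStepA, h1]]
    rw [pvKey t x y (PySem.Set.add s (a, b, x)) (n + 1 + 1) h2]
    simp [pvTriples]

theorem pvTriples_nil_of_short (l : List String) (h : l.length < 3) : pvTriples l = [] := by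
  match l with
  | [] | [_] | [_, _] => rfl
  | _ :: _ :: _ :: _ => simp at h; omega

-- B-side loop invariant: the while loop appends exactly pvTriples of the remaining suffix
theorem pvLoopB_eq (path : List String) (i : Nat) (acc : List (String × String × String)) :
    pvLoopB path i acc = acc ++ pvTriples (path.drop i) := by
    rw [pvLoopB]
    split
    · next h =>
      have h0 : i < path.length := by omega
      have h1 : i + 1 < path.length := by omega
      rw [pvLoopB_eq path (i + 2)]
      rw [List.drop_eq_getElem_cons h0, List.drop_eq_getElem_cons h1,
        List.drop_eq_getElem_cons h]
      have : pvTriples (path[i] :: path[i + 1] :: path[i + 2] :: path.drop (i + 2 + 1))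
          = (path[i], path[i + 1], path[i + 2])
              :: pvTriples (path[i + 2] :: path.drop (i + 2 + 1)) := by
        simp [pvTriples]
      rw [this, ← List.drop_eq_getElem_cons h]
      simp
    · next h =>
      rw [pvTriples_nil_of_short _ (by have := List.length_drop (l := path) (i := i); omega)]
      simp
termination_by path.length - i

-- ===== VERDICT (by name: the statement is the Claim_ definition above) =====
theorem get_triples_from_path_spec : Claim_equal_get_triples_from_path := by
  intro path _
  unfold Spec_get_triples_from_path get_triples_from_path get_triples_from_path_alt
  rw [pvLoopB_eq path 0 [], List.nil_append, List.drop_zero,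
    PySem.Set.ofList_eq_foldl]
  match path with
  | [] => simp [PySem.List.enumerate_nil, pvTriples]
  | [e] =>
    simp [PySem.List.enumerate_cons, PySem.List.enumerate_nil, pvStepA, pvTriples,
      PySem.Int.mod]
  | e :: r :: p =>
    have h0 : (2 : Int) ∣ 0 := by decide
    have h1 := pvMod_two_even_succ h0
    simp only [PySem.List.enumerate_cons, List.foldl_cons]
    rw [show pvStepA (none, none, PySem.Set.empty) (0, e)
          = (some e, none, PySem.Set.empty) by simp [pvStepA]]
    rw [show pvStepA (some e, none, PySem.Set.empty) (0 + 1, r)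
          = (some e, some r, PySem.Set.empty) by simp [pvStepA]]
    rw [pvKey p e r PySem.Set.empty (0 + 1 + 1) (pvMod_two_even_succ_succ h0)]
    rfl
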